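-- pv_equiv track=rewrite | github.com/Paulndambo/INSURANCE-SAAS-APP | apps/sales/family_member_upload_methods/get_dependent_types.py | get_relation_type
-- ===== SOURCE A (Python) =====
-- child_types = ['Son', 'Daughter', 'Child']
--
-- parent_in_law_types = ['Parent In-Law', 'Parent in law', 'Parent-in-law']
--
-- mother_in_law_types = ['Mother in law', 'mother_in_law', 'Mother-in-law', 'Mother-In-Law', 'Mother_In_Law', 'Mother In-Law']
--
-- father_in_law_types = ['Father in law', 'father_in_law', 'Father-in-law', 'Father-In-Law', 'Father_In_Law', 'Father In-Law']
--
-- sibling_in_laws_types = ['Sibling In-Law', 'Brother in law', 'Brother-in-law', 'Sister in law', 'Son in law', 'Daughter in law']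
--
-- grandparent_types = ['Grandparent', 'Grandfather', 'Grandmother']
--
-- grandchildren_types = ['Grandchild', 'Granddaughter', 'Grandson']
--
-- sibling_types = ['Sibling', 'Brother', 'Sister']
--
-- cousin_types = ['Cousin', 'cousin', 'COUSIN']
--
-- spouse_types = ['Spouse', 'Partner', 'Wife', 'Husband']
--
-- father_types = ['father', 'Step father', 'Step-Father']
--
-- mother_types = ['Mother', 'Step Mother', 'Step-Mother']
--
-- def get_relation_type(dependent_type: str):
--     relation_type = ''
--     if dependent_type.lower() in [x.lower() for x in child_types]:
--         relation_type = 'child'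
--     elif dependent_type.lower() in [x.lower() for x in parent_in_law_types]:
--         relation_type = 'parent_in_law'
--     elif dependent_type.lower() in [x.lower() for x in father_in_law_types]:
--         relation_type = 'father_in_law'
--     elif dependent_type.lower() in [x.lower() for x in mother_in_law_types]:
--         relation_type = 'mother_in_law'
--     elif dependent_type.lower() in [x.lower() for x in sibling_in_laws_types]:
--         relation_type = 'sibling_in_law'
--     elif dependent_type.lower() in [x.lower() for x in grandparent_types]:
--         relation_type = 'grandparent'
--     elif dependent_type.lower() in [x.lower() for x in grandchildren_types]:
--         relation_type = 'grandchild'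
--     elif dependent_type.lower() in [x.lower() for x in sibling_types]:
--         relation_type = 'sibling'
--     elif dependent_type.lower() in [x.lower() for x in cousin_types]:
--         relation_type = 'cousin'
--     elif dependent_type.lower() in [x.lower()  for x in spouse_types]:
--         relation_type = 'spouse'
--     elif dependent_type.lower() in [x.lower() for x in father_types]:
--         relation_type = 'parent'
--     elif dependent_type.lower() in [x.lower() for x in mother_types]:
--         relation_type = 'parent'
--     elif dependent_type == 'Adult Child':
--         relation_type = 'adult_child'
--     elif dependent_type == 'Minor Child':
--         relation_type = 'minor_child'
--     elif dependent_type == 'Senior Citizen Parent':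
--         relation_type = 'senior_citizen_parent'
--     else:
--         relation_type = dependent_type.lower()
--
--     return relation_type
-- ===== SOURCE B (Python) =====
-- # B: one precomputed lowercased-key table (chain order, setdefault) + a specials dict, replacing A's 12-branch if/elif chain.
-- child_types = ['Son', 'Daughter', 'Child']
-- parent_in_law_types = ['Parent In-Law', 'Parent in law', 'Parent-in-law']
-- mother_in_law_types = ['Mother in law', 'mother_in_law', 'Mother-in-law', 'Mother-In-Law', 'Mother_In_Law', 'Mother In-Law']
-- father_in_law_types = ['Father in law', 'father_in_law', 'Father-in-law', 'Father-In-Law', 'Father_In_Law', 'Father In-Law']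
-- sibling_in_laws_types = ['Sibling In-Law', 'Brother in law', 'Brother-in-law', 'Sister in law', 'Son in law', 'Daughter in law']
-- grandparent_types = ['Grandparent', 'Grandfather', 'Grandmother']
-- grandchildren_types = ['Grandchild', 'Granddaughter', 'Grandson']
-- sibling_types = ['Sibling', 'Brother', 'Sister']
-- cousin_types = ['Cousin', 'cousin', 'COUSIN']
-- spouse_types = ['Spouse', 'Partner', 'Wife', 'Husband']
-- father_types = ['father', 'Step father', 'Step-Father']
-- mother_types = ['Mother', 'Step Mother', 'Step-Mother']
--
-- _CATEGORIES = [
--     (child_types, 'child'),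
--     (parent_in_law_types, 'parent_in_law'),
--     (father_in_law_types, 'father_in_law'),
--     (mother_in_law_types, 'mother_in_law'),
--     (sibling_in_laws_types, 'sibling_in_law'),
--     (grandparent_types, 'grandparent'),
--     (grandchildren_types, 'grandchild'),
--     (sibling_types, 'sibling'),
--     (cousin_types, 'cousin'),
--     (spouse_types, 'spouse'),
--     (father_types, 'parent'),
--     (mother_types, 'parent'),
-- ]
--
-- _TABLE = {}
-- for _names, _rel in _CATEGORIES:
--     for _name in _names:
--         _TABLE.setdefault(_name.lower(), _rel)
--
-- _SPECIALS = {
--     'Adult Child': 'adult_child',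
--     'Minor Child': 'minor_child',
--     'Senior Citizen Parent': 'senior_citizen_parent',
-- }
--
-- def get_relation_type(dependent_type: str):
--     key = dependent_type.lower()
--     result = _TABLE.get(key)
--     if result is not None:
--         return result
--     return _SPECIALS.get(dependent_type, key)
-- ===== Notes on version B (the rewrite author's own statement) =====
-- stated objective: simpler
-- what changed: Replaced A's 12-branch if/elif chain that lowercases every category list on each call by one module-level lowercased-key dict built once with setdefault in chain order, plus a small dict for the three case-sensitive special cases; get_relation_type becomes a single table lookup with a specials/default fallback.
import Mathlib
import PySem

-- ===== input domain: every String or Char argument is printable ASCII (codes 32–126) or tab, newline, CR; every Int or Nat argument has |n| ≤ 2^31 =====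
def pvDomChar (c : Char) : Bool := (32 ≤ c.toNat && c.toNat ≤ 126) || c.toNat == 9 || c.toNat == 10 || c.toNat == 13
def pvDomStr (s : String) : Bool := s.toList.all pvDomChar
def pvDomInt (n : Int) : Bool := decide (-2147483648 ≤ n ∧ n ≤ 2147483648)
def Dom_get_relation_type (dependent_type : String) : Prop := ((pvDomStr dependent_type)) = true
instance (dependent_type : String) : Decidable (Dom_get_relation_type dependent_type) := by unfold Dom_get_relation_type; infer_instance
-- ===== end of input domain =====

set_option maxRecDepth 20000

-- B replaces A's 12-branch if/elif chain by one precomputed lowercased-key table (built in chain order with setdefault) plus a specials dict; same return value everywhere.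

-- ===== PORT A =====
def child_types : List String := ["Son", "Daughter", "Child"]
def parent_in_law_types : List String := ["Parent In-Law", "Parent in law", "Parent-in-law"]
def mother_in_law_types : List String := ["Mother in law", "mother_in_law", "Mother-in-law", "Mother-In-Law", "Mother_In_Law", "Mother In-Law"]
def father_in_law_types : List String := ["Father in law", "father_in_law", "Father-in-law", "Father-In-Law", "Father_In_Law", "Father In-Law"]
def sibling_in_laws_types : List String := ["Sibling In-Law", "Brother in law", "Brother-in-law", "Sister in law", "Son in law", "Daughter in law"]
def grandparent_types : List String := ["Grandparent", "Grandfather", "Grandmother"]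
def grandchildren_types : List String := ["Grandchild", "Granddaughter", "Grandson"]
def sibling_types : List String := ["Sibling", "Brother", "Sister"]
def cousin_types : List String := ["Cousin", "cousin", "COUSIN"]
def spouse_types : List String := ["Spouse", "Partner", "Wife", "Husband"]
def father_types : List String := ["father", "Step father", "Step-Father"]
def mother_types : List String := ["Mother", "Step Mother", "Step-Mother"]

def get_relation_type (dependent_type : String) : String :=
  if PySem.Str.lower dependent_type ∈ child_types.map PySem.Str.lower then "child"
  else if PySem.Str.lower dependent_type ∈ parent_in_law_types.map PySem.Str.lower then "parent_in_law"
  else if PySem.Str.lower dependent_type ∈ father_in_law_types.map PySem.Str.lower then "father_in_law"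
  else if PySem.Str.lower dependent_type ∈ mother_in_law_types.map PySem.Str.lower then "mother_in_law"
  else if PySem.Str.lower dependent_type ∈ sibling_in_laws_types.map PySem.Str.lower then "sibling_in_law"
  else if PySem.Str.lower dependent_type ∈ grandparent_types.map PySem.Str.lower then "grandparent"
  else if PySem.Str.lower dependent_type ∈ grandchildren_types.map PySem.Str.lower then "grandchild"
  else if PySem.Str.lower dependent_type ∈ sibling_types.map PySem.Str.lower then "sibling"
  else if PySem.Str.lower dependent_type ∈ cousin_types.map PySem.Str.lower then "cousin"
  else if PySem.Str.lower dependent_type ∈ spouse_types.map PySem.Str.lower then "spouse"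
  else if PySem.Str.lower dependent_type ∈ father_types.map PySem.Str.lower then "parent"
  else if PySem.Str.lower dependent_type ∈ mother_types.map PySem.Str.lower then "parent"
  else if dependent_type = "Adult Child" then "adult_child"
  else if dependent_type = "Minor Child" then "minor_child"
  else if dependent_type = "Senior Citizen Parent" then "senior_citizen_parent"
  else PySem.Str.lower dependent_type

-- ===== PORT B =====
def pvCategories : List (List String × String) :=
  [ (child_types, "child"), (parent_in_law_types, "parent_in_law"),
    (father_in_law_types, "father_in_law"), (mother_in_law_types, "mother_in_law"),
    (sibling_in_laws_types, "sibling_in_law"), (grandparent_types, "grandparent"),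
    (grandchildren_types, "grandchild"), (sibling_types, "sibling"),
    (cousin_types, "cousin"), (spouse_types, "spouse"),
    (father_types, "parent"), (mother_types, "parent") ]

-- the module-level setdefault loop of Source B
def pvTable : PySem.Dict String String :=
  pvCategories.foldl
    (fun d p => p.1.foldl
      (fun d name =>
        if (d.get? (PySem.Str.lower name)).isSome then d
        else d.insert (PySem.Str.lower name) p.2) d)
    PySem.Dict.empty

def pvSpecials : PySem.Dict String String :=
  PySem.Dict.ofList
    [("Adult Child", "adult_child"), ("Minor Child", "minor_child"),
     ("Senior Citizen Parent", "senior_citizen_parent")]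

def get_relation_type_alt (dependent_type : String) : String :=
  let key := PySem.Str.lower dependent_type
  match pvTable.get? key with
  | some r => r
  | none => pvSpecials.getD dependent_type key

-- ===== PRECONDITION & SPEC =====
def Spec_get_relation_type (dependent_type : String) (out : String) : Prop := out = get_relation_type_alt dependent_type
instance (dependent_type : String) (out : String) : Decidable (Spec_get_relation_type dependent_type out) := by unfold Spec_get_relation_type; infer_instance

-- ===== CLAIM (what is proved, stated in full; the proofs are below) =====
def Claim_equal_get_relation_type : Prop := ∀ (dependent_type : String), Dom_get_relation_type dependent_type → Spec_get_relation_type dependent_type (get_relation_type dependent_type)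

-- ===== LEMMAS AND PROOFS =====

-- the setdefault loop of port B, evaluated once to the finished lowercased-key table
theorem pvTable_eq : pvTable = PySem.Dict.mk [("son", "child"), ("daughter", "child"), ("child", "child"), ("parent in-law", "parent_in_law"), ("parent in law", "parent_in_law"), ("parent-in-law", "parent_in_law"), ("father in law", "father_in_law"), ("father_in_law", "father_in_law"), ("father-in-law", "father_in_law"), ("father in-law", "father_in_law"), ("mother in law", "mother_in_law"), ("mother_in_law", "mother_in_law"), ("mother-in-law", "mother_in_law"), ("mother in-law", "mother_in_law"), ("sibling in-law", "sibling_in_law"), ("brother in law", "sibling_in_law"), ("brother-in-law", "sibling_in_law"), ("sister in law", "sibling_in_law"), ("son in law", "sibling_in_law"), ("daughter in law", "sibling_in_law"), ("grandparent", "grandparent"), ("grandfather", "grandparent"), ("grandmother", "grandparent"), ("grandchild", "grandchild"), ("granddaughter", "grandchild"), ("grandson", "grandchild"), ("sibling", "sibling"), ("brother", "sibling"), ("sister", "sibling"), ("cousin", "cousin"), ("spouse", "spouse"), ("partner", "spouse"), ("wife", "spouse"), ("husband", "spouse"), ("father", "parent"), ("step father", "parent"), ("step-father", "parent"), ("mother",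 "parent"), ("step mother", "parent"), ("step-mother", "parent")] := by decide

-- A's twelve lowered membership tests, as literal lists: a key missing from all of them is not in the table
theorem pvTable_get?_none (t : String)
    (h1 : t ∉ (["son", "daughter", "child"] : List String))
    (h2 : t ∉ (["parent in-law", "parent in law", "parent-in-law"] : List String))
    (h3 : t ∉ (["father in law", "father_in_law", "father-in-law", "father-in-law", "father_in_law", "father in-law"] : List String))
    (h4 : t ∉ (["mother in law", "mother_in_law", "mother-in-law", "mother-in-law", "mother_in_law", "mother in-law"] : List String))
    (h5 : t ∉ (["sibling in-law", "brother in law", "brother-in-law", "sister in law", "son in law", "daughter in law"] : List String))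
    (h6 : t ∉ (["grandparent", "grandfather", "grandmother"] : List String))
    (h7 : t ∉ (["grandchild", "granddaughter", "grandson"] : List String))
    (h8 : t ∉ (["sibling", "brother", "sister"] : List String))
    (h9 : t ∉ (["cousin", "cousin", "cousin"] : List String))
    (h10 : t ∉ (["spouse", "partner", "wife", "husband"] : List String))
    (h11 : t ∉ (["father", "step father", "step-father"] : List String))
    (h12 : t ∉ (["mother", "step mother", "step-mother"] : List String)) :
    pvTable.get? t = none := by
  have ek : pvTable.keys = (["son", "daughter", "child", "parent in-law", "parent in law", "parent-in-law", "father in law", "father_in_law", "father-in-law", "father in-law", "mother in law", "mother_in_law", "mother-in-law", "mother in-law", "sibling in-law", "brother in law", "brother-in-law", "sister in law", "son in law", "daughter in law", "grandparent", "grandfather", "grandmother", "grandchild", "granddaughter", "grandson", "sibling", "brother", "sister", "cousin", "spouse", "partner", "wife", "husband", "father", "step father", "step-father", "mother", "step mother", "step-mother"] : List String) := by rw [pvTable_eq]; rfl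
  rw [PySem.Dict.get?_eq_none_iff_not_mem_keys, ek]
  intro hm
  simp only [List.mem_cons, List.not_mem_nil, or_false] at hm h1 h2 h3 h4 h5 h6 h7 h8 h9 h10 h11 h12
  tauto

-- the three case-sensitive specials of A equal B's fallback lookup in pvSpecials
theorem pvSpecials_branch (s t : String) :
    (if s = "Adult Child" then "adult_child"
     else if s = "Minor Child" then "minor_child"
     else if s = "Senior Citizen Parent" then "senior_citizen_parent"
     else t) = pvSpecials.getD s t := by
  have e : pvSpecials = PySem.Dict.mk [("Adult Child", "adult_child"), ("Minor Child", "minor_child"), ("Senior Citizen Parent", "senior_citizen_parent")] := by rfl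
  rw [e, PySem.Dict.getD_eq_get?_getD]
  by_cases a : s = "Adult Child"
  · subst a; rfl
  by_cases b : s = "Minor Child"
  · subst b; rfl
  by_cases c : s = "Senior Citizen Parent"
  · subst c; rfl
  have a' : (("Adult Child" : String) == s) = false := beq_eq_false_iff_ne.mpr (fun h => a h.symm)
  have b' : (("Minor Child" : String) == s) = false := beq_eq_false_iff_ne.mpr (fun h => b h.symm)
  have c' : (("Senior Citizen Parent" : String) == s) = false := beq_eq_false_iff_ne.mpr (fun h => c h.symm)
  simp [a, b, c, a', b', c', PySem.Dict.get?]

-- ===== VERDICT (by name: the statement is the Claim_ definition above) =====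
theorem get_relation_type_spec : Claim_equal_get_relation_type := by
  intro s _
  unfold Spec_get_relation_type
  simp only [get_relation_type, get_relation_type_alt]
  have e1 : child_types.map PySem.Str.lower = (["son", "daughter", "child"] : List String) := by rfl
  have e2 : parent_in_law_types.map PySem.Str.lower = (["parent in-law", "parent in law", "parent-in-law"] : List String) := by rfl
  have e3 : father_in_law_types.map PySem.Str.lower = (["father in law", "father_in_law", "father-in-law", "father-in-law", "father_in_law", "father in-law"] : List String) := by rfl
  have e4 : mother_in_law_types.map PySem.Str.lower = (["mother in law", "mother_in_law", "mother-in-law", "mother-in-law", "mother_in_law", "mother in-law"] : List String) := by rfl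
  have e5 : sibling_in_laws_types.map PySem.Str.lower = (["sibling in-law", "brother in law", "brother-in-law", "sister in law", "son in law", "daughter in law"] : List String) := by rfl
  have e6 : grandparent_types.map PySem.Str.lower = (["grandparent", "grandfather", "grandmother"] : List String) := by rfl
  have e7 : grandchildren_types.map PySem.Str.lower = (["grandchild", "granddaughter", "grandson"] : List String) := by rfl
  have e8 : sibling_types.map PySem.Str.lower = (["sibling", "brother", "sister"] : List String) := by rfl
  have e9 : cousin_types.map PySem.Str.lower = (["cousin", "cousin", "cousin"] : List String) := by rfl
  have e10 : spouse_types.map PySem.Str.lower = (["spouse", "partner", "wife", "husband"] : List String) := by rfl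
  have e11 : father_types.map PySem.Str.lower = (["father", "step father", "step-father"] : List String) := by rfl
  have e12 : mother_types.map PySem.Str.lower = (["mother", "step mother", "step-mother"] : List String) := by rfl
  rw [e1, e2, e3, e4, e5, e6, e7, e8, e9, e10, e11, e12]
  generalize PySem.Str.lower s = t
  have hg : ∀ u : String, pvTable.get? u = (PySem.Dict.mk [("son", "child"), ("daughter", "child"), ("child", "child"), ("parent in-law", "parent_in_law"), ("parent in law", "parent_in_law"), ("parent-in-law", "parent_in_law"), ("father in law", "father_in_law"), ("father_in_law", "father_in_law"), ("father-in-law", "father_in_law"), ("father in-law", "father_in_law"), ("mother in law", "mother_in_law"), ("mother_in_law", "mother_in_law"), ("mother-in-law", "mother_in_law"), ("mother in-law", "mother_in_law"), ("sibling in-law", "sibling_in_law"), ("brother in law", "sibling_in_law"), ("brother-in-law", "sibling_in_law"), ("sister in law", "sibling_in_law"), ("son in law", "sibling_in_law"), ("daughter in law", "sibling_in_law"), ("grandparent", "grandparent"), ("grandfather", "grandparent"), ("grandmother", "grandparent"), ("grandchild", "grandchild"), ("granddaughter", "grandchild"), ("grandson", "grandchild"), ("sibling", "sibling"), ("brother",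 "sibling"), ("sister", "sibling"), ("cousin", "cousin"), ("spouse", "spouse"), ("partner", "spouse"), ("wife", "spouse"), ("husband", "spouse"), ("father", "parent"), ("step father", "parent"), ("step-father", "parent"), ("mother", "parent"), ("step mother", "parent"), ("step-mother", "parent")]).get? u := by intro u; rw [pvTable_eq]
  simp only [hg]
  by_cases h1 : t ∈ (["son", "daughter", "child"] : List String)
  · simp only [List.mem_cons, List.not_mem_nil, or_false] at h1
    rcases h1 with rfl|rfl|rfl <;> rfl
  by_cases h2 : t ∈ (["parent in-law", "parent in law", "parent-in-law"] : List String)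
  · simp only [List.mem_cons, List.not_mem_nil, or_false] at h2
    rcases h2 with rfl|rfl|rfl <;> rfl
  by_cases h3 : t ∈ (["father in law", "father_in_law", "father-in-law", "father-in-law", "father_in_law", "father in-law"] : List String)
  · simp only [List.mem_cons, List.not_mem_nil, or_false] at h3
    rcases h3 with rfl|rfl|rfl|rfl|rfl|rfl <;> rfl
  by_cases h4 : t ∈ (["mother in law", "mother_in_law", "mother-in-law", "mother-in-law", "mother_in_law", "mother in-law"] : List String)
  · simp only [List.mem_cons, List.not_mem_nil, or_false] at h4
    rcases h4 with rfl|rfl|rfl|rfl|rfl|rfl <;> rfl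
  by_cases h5 : t ∈ (["sibling in-law", "brother in law", "brother-in-law", "sister in law", "son in law", "daughter in law"] : List String)
  · simp only [List.mem_cons, List.not_mem_nil, or_false] at h5
    rcases h5 with rfl|rfl|rfl|rfl|rfl|rfl <;> rfl
  by_cases h6 : t ∈ (["grandparent", "grandfather", "grandmother"] : List String)
  · simp only [List.mem_cons, List.not_mem_nil, or_false] at h6
    rcases h6 with rfl|rfl|rfl <;> rfl
  by_cases h7 : t ∈ (["grandchild", "granddaughter", "grandson"] : List String)
  · simp only [List.mem_cons, List.not_mem_nil, or_false] at h7
    rcases h7 with rfl|rfl|rfl <;> rfl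
  by_cases h8 : t ∈ (["sibling", "brother", "sister"] : List String)
  · simp only [List.mem_cons, List.not_mem_nil, or_false] at h8
    rcases h8 with rfl|rfl|rfl <;> rfl
  by_cases h9 : t ∈ (["cousin", "cousin", "cousin"] : List String)
  · simp only [List.mem_cons, List.not_mem_nil, or_false] at h9
    rcases h9 with rfl|rfl|rfl <;> rfl
  by_cases h10 : t ∈ (["spouse", "partner", "wife", "husband"] : List String)
  · simp only [List.mem_cons, List.not_mem_nil, or_false] at h10
    rcases h10 with rfl|rfl|rfl|rfl <;> rfl
  by_cases h11 : t ∈ (["father", "step father", "step-father"] : List String)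
  · simp only [List.mem_cons, List.not_mem_nil, or_false] at h11
    rcases h11 with rfl|rfl|rfl <;> rfl
  by_cases h12 : t ∈ (["mother", "step mother", "step-mother"] : List String)
  · simp only [List.mem_cons, List.not_mem_nil, or_false] at h12
    rcases h12 with rfl|rfl|rfl <;> rfl
  rw [if_neg h1, if_neg h2, if_neg h3, if_neg h4, if_neg h5, if_neg h6, if_neg h7, if_neg h8, if_neg h9, if_neg h10, if_neg h11, if_neg h12,
      ← pvTable_eq, pvTable_get?_none t h1 h2 h3 h4 h5 h6 h7 h8 h9 h10 h11 h12]
  exact pvSpecials_branch s t
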